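-- pv_equiv track=rewrite | github.com/HaideiGV/full-screen-tic-tac-toe-game | main.py | x_cell
-- ===== SOURCE A (Python) =====
-- def x_cell(size):
--     top_array = []
--     for i in range(0, int(size/2)):
--         pad = i
--         pad_str = pad * " "
--         char = '#'
--         middle = (size - 2 - 2 * pad) * " "
--         top_array.append("{}{}{}{}{}".format(pad_str, char, middle, char, pad_str))
--
--     bottom_array = top_array.copy()
--     bottom_array.reverse()
--     for item in bottom_array:
--         top_array.append(item)
--
--     return "\n".join(top_array)
-- ===== SOURCE B (Python) =====
-- def x_cell(size):
--     n = int(size / 2) * 2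
--     def row(j):
--         pad = min(j, n - 1 - j)
--         return pad * " " + "#" + (size - 2 - 2 * pad) * " " + "#" + pad * " "
--     return "\n".join(row(j) for j in range(n))
-- ===== Notes on version B (the rewrite author's own statement) =====
-- stated objective: simpler
-- what changed: B generates every row in one direct pass, computing each row's pad as the distance to the nearer end of the figure, instead of A's build-the-top-half list, copy, reverse and append.
import Mathlib
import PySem

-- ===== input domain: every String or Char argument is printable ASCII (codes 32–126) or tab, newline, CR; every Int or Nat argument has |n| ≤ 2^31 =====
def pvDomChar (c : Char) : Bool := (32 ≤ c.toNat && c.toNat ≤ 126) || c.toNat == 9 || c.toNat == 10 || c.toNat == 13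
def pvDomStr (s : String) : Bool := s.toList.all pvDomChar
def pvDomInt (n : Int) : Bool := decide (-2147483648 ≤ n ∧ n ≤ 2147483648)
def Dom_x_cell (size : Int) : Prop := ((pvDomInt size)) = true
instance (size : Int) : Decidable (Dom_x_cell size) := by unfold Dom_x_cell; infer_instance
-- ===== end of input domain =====

-- B builds the rows in ONE direct pass, pad = distance to the nearest end, instead of A's
-- build-top-half-then-copy-reverse-append; same output, simpler decomposition (objective: simpler).

-- ===== PORT A =====
-- ' ' * n : Python's string repetition ('' when n ≤ 0; exact on this domain)
def spaces (n : Int) : List Char := List.replicate n.toNat ' '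

-- "{pad*' '}#{(size-2-2*pad)*' '}#{pad*' '}" — the row A's format() builds
def xrow (size pad : Int) : String :=
  String.mk (spaces pad ++ ['#'] ++ spaces (size - 2 - 2 * pad) ++ ['#'] ++ spaces pad)

def x_cell (size : Int) : String :=
  let top := (PySem.List.pyRange 0 (PySem.Int.truncdiv size 2) 1).foldl
      (fun acc i => acc ++ [xrow size i]) []
  let bottom := top.reverse
  let all := bottom.foldl (fun acc item => acc ++ [item]) top
  PySem.Str.join "\n" all

-- ===== PORT B =====
-- B's row helper: pad is the symmetric distance to the nearest end
def xrowB (size n j : Int) : String :=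
  let pad := min j (n - 1 - j)
  String.mk (spaces pad ++ ['#'] ++ spaces (size - 2 - 2 * pad) ++ ['#'] ++ spaces pad)

def x_cell_alt (size : Int) : String :=
  let n := PySem.Int.truncdiv size 2 * 2
  PySem.Str.join "\n" ((PySem.List.pyRange 0 n 1).map (xrowB size n))

-- ===== PRECONDITION & SPEC =====
def Spec_x_cell (size : Int) (out : String) : Prop := out = x_cell_alt size
instance (size : Int) (out : String) : Decidable (Spec_x_cell size out) := by unfold Spec_x_cell; infer_instance

-- ===== CLAIM (what is proved, stated in full; the proofs are below) =====
def Claim_equal_x_cell : Prop := ∀ (size : Int), Dom_x_cell size → Spec_x_cell size (x_cell size)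

-- ===== LEMMAS AND PROOFS =====

-- reflecting the index range [t, 2t) about its midpoint yields [0, t) reversed
lemma map_reflect_pyRange (t : Int) :
    (PySem.List.pyRange t (t*2) 1).map (fun j => t*2 - 1 - j)
      = (PySem.List.pyRange 0 t 1).reverse := by
  rw [PySem.List.pyRange_one, PySem.List.pyRange_one, ← List.map_reverse, List.map_map]
  apply List.ext_getElem
  · simp only [List.length_map, List.length_reverse, List.length_range]; omega
  · intro i h1 h2
    simp only [List.getElem_map, List.getElem_reverse, List.getElem_range, Function.comp]
    simp only [List.length_map, List.length_reverse, List.length_range] at h1 h2 ⊢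
    omega

lemma lists_eq (size : Int) :
    ((PySem.List.pyRange 0 (PySem.Int.truncdiv size 2) 1).map (xrow size))
      ++ ((PySem.List.pyRange 0 (PySem.Int.truncdiv size 2) 1).map (xrow size)).reverse
    = (PySem.List.pyRange 0 (PySem.Int.truncdiv size 2 * 2) 1).map
        (xrowB size (PySem.Int.truncdiv size 2 * 2)) := by
  set t := PySem.Int.truncdiv size 2 with ht
  by_cases hpos : 0 < t
  · rw [PySem.List.pyRange_one_append 0 t (t*2) (by omega) (by omega), List.map_append]
    congr 1
    · apply List.map_congr_left
      intro j hj
      rw [PySem.List.mem_pyRange_one] at hj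
      simp only [xrowB, xrow]
      have : min j (t*2 - 1 - j) = j := by omega
      rw [this]
    · rw [show (PySem.List.pyRange t (t*2) 1).map (xrowB size (t*2))
            = (PySem.List.pyRange t (t*2) 1).map (fun j => xrow size (t*2 - 1 - j)) by
          apply List.map_congr_left
          intro j hj
          rw [PySem.List.mem_pyRange_one] at hj
          simp only [xrowB, xrow]
          have : min j (t*2 - 1 - j) = t*2 - 1 - j := by omega
          rw [this]]
      rw [show (fun j => xrow size (t*2 - 1 - j)) = xrow size ∘ (fun j => t*2 - 1 - j) from rfl,
          ← List.map_map, map_reflect_pyRange, List.map_reverse]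
  · rw [PySem.List.pyRange_one_eq_nil (by omega), PySem.List.pyRange_one_eq_nil (by omega)]
    simp

-- ===== VERDICT (by name: the statement is the Claim_ definition above) =====
theorem x_cell_spec : Claim_equal_x_cell := by
  intro size _
  show x_cell size = x_cell_alt size
  unfold x_cell x_cell_alt
  simp only [PySem.List.foldl_append_singleton_eq_map,
    List.nil_append, List.map_id']
  rw [lists_eq]
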